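-- pv_equiv track=rewrite | github.com/diogoh-11/FP | TP2/Aula14-2.py | replaceCharactersWithUnderscores
-- ===== SOURCE A (Python) =====
-- def replaceCharactersWithUnderscores(s, t):
--     new = ""
--     for l in s:
--         if l in t:
--            new += "_"
--         else:
--            new += l
--     return new
-- ===== SOURCE B (Python) =====
-- def replaceCharactersWithUnderscores(s, t):
--     # Staged passes: for each character of t, replace all its occurrences in s
--     # with '_' using whole-string str.replace. Order does not matter because
--     # every replacement writes '_' and '_' maps to '_' again.
--     for c in t:
--         s = s.replace(c, "_")
--     return s
-- ===== Notes on version B (the rewrite author's own statement) =====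
-- stated objective: alternative
-- what changed: Instead of one pass over s testing each character for membership in t, B loops over t and performs a whole-string s.replace(c, '_') per character of t (staged replacement passes; correct since all replacements write '_' and commute).
import Mathlib
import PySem

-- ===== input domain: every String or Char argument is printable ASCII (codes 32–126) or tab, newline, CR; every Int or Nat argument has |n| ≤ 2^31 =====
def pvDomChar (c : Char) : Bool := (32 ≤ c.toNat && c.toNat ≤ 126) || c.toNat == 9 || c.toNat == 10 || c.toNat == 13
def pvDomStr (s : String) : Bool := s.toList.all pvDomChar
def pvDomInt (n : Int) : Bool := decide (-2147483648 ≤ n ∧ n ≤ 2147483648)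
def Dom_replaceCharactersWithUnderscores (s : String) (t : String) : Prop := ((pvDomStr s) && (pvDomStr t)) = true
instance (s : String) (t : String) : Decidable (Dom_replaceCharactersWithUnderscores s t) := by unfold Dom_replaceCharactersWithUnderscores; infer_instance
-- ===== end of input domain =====

-- B replaces A's single pass over s (per-character membership test in t) by staged
-- whole-string replacement passes, one s.replace(c, "_") per character of t
-- (alternative decomposition; return value proved equal).


-- ===== PORT A =====
-- Port of A: left fold over s's characters, appending '_' when the character
-- occurs in t ('l in t' for a single character = membership in t's characters).
def replaceCharactersWithUnderscores (s : String) (t : String) : String :=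
  String.ofList (s.toList.foldl
    (fun new l => if t.toList.contains l then new ++ ['_'] else new ++ [l]) [])

-- ===== PORT B =====
-- Port of B: fold over t's characters, each step doing the whole-string
-- s.replace(c, "_") (= PySem.Str.replace).
def replaceCharactersWithUnderscores_alt (s : String) (t : String) : String :=
  t.toList.foldl (fun s c => PySem.Str.replace s (String.ofList [c]) "_") s

-- ===== PRECONDITION & SPEC =====
def Spec_replaceCharactersWithUnderscores (s : String) (t : String) (out : String) : Prop := out = replaceCharactersWithUnderscores_alt s t
instance (s : String) (t : String) (out : String) : Decidable (Spec_replaceCharactersWithUnderscores s t out) := by unfold Spec_replaceCharactersWithUnderscores; infer_instance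

-- ===== CLAIM (what is proved, stated in full; the proofs are below) =====
def Claim_equal_replaceCharactersWithUnderscores : Prop := ∀ (s : String) (t : String), Dom_replaceCharactersWithUnderscores s t → Spec_replaceCharactersWithUnderscores s t (replaceCharactersWithUnderscores s t)

-- ===== LEMMAS AND PROOFS =====

-- replace.go with a single-character pattern is a character map
theorem replace_go_single (c : Char) :
    ∀ (fuel : Nat) (l acc : List Char), l.length ≤ fuel →
    PySem.Chars.replace.go [c] ['_'] fuel l acc
      = acc.reverse ++ l.map (fun x => if x = c then '_' else x) := by
  intro fuel
  induction fuel with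
  | zero =>
    intro l acc h
    have : l = [] := List.eq_nil_of_length_eq_zero (Nat.le_zero.mp h)
    subst this
    simp [PySem.Chars.replace.go]
  | succ fuel ih =>
    intro l acc h
    cases l with
    | nil => simp [PySem.Chars.replace.go]
    | cons x l' =>
      have hlen : l'.length ≤ fuel := by simpa using Nat.succ_le_succ_iff.mp h
      by_cases hx : x = c
      · simp [PySem.Chars.replace.go, List.isPrefixOf, ih _ _ hlen, hx]
      · have hpre : List.isPrefixOf [c] (x :: l') = false := by
          simp [List.isPrefixOf]; exact fun h' => hx h'.symm
        rw [show PySem.Chars.replace.go [c] ['_'] (fuel+1) (x :: l') acc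
              = PySem.Chars.replace.go [c] ['_'] fuel l' (x :: acc) by
            simp [PySem.Chars.replace.go, hpre]]
        simp [ih _ _ hlen, hx]

-- whole-string single-character replace = character map
theorem replace_single (s : List Char) (c : Char) :
    PySem.Chars.replace s [c] ['_'] = s.map (fun x => if x = c then '_' else x) := by
  simp [PySem.Chars.replace, replace_go_single c s.length s [] (le_refl _)]

-- staged replacement passes over ts = one membership-based map
theorem fold_replace_map (ts : List Char) :
    ∀ (l : List Char),
    ts.foldl (fun l c => l.map (fun x => if x = c then '_' else x)) l
      = l.map (fun x => if x ∈ ts then '_' else x) := by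
  induction ts with
  | nil => intro l; simp
  | cons c ts ih =>
    intro l
    simp only [List.foldl_cons, ih, List.map_map]
    apply List.map_congr_left
    intro x _
    simp only [Function.comp_apply, List.mem_cons]
    by_cases hx : x = c
    · by_cases hu : ('_' : Char) ∈ ts <;> simp [hx, hu]
    · by_cases hm : x ∈ ts <;> simp [hx, hm]

-- A's accumulator fold = the membership-based map
theorem foldA_eq_map (t : String) :
    ∀ (l acc : List Char),
    l.foldl (fun new x => if t.toList.contains x then new ++ ['_'] else new ++ [x]) acc
      = acc ++ l.map (fun x => if x ∈ t.toList then '_' else x) := by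
  intro l
  induction l with
  | nil => intro acc; simp
  | cons x l ih =>
    intro acc
    simp only [List.foldl_cons, List.map_cons]
    by_cases hx : x ∈ t.toList
    · rw [if_pos (by simpa using hx), ih]; simp [hx]
    · rw [if_neg (by simpa using hx), ih]; simp [hx]

-- ===== VERDICT (by name: the statement is the Claim_ definition above) =====
theorem replaceCharactersWithUnderscores_spec : Claim_equal_replaceCharactersWithUnderscores := by
  intro s t _
  unfold Spec_replaceCharactersWithUnderscores
  unfold replaceCharactersWithUnderscores replaceCharactersWithUnderscores_alt
  have hB : ∀ (u : String),
      t.toList.foldl (fun s c => PySem.Str.replace s (String.ofList [c]) "_") u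
        = String.ofList (t.toList.foldl
            (fun l c => l.map (fun x => if x = c then '_' else x)) u.toList) := by
    intro u
    induction t.toList generalizing u with
    | nil => simp
    | cons c ts ih =>
      simp only [List.foldl_cons, ih]
      congr 1
      simp [PySem.Str.replace, String.toList_ofList, replace_single]
  rw [hB, fold_replace_map, foldA_eq_map]
  simp
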